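-- pv_equiv track=rewrite | github.com/tead1234/BackjoonAlgorithm | Algorithm/Pro_level3/1.py | solution
-- ===== SOURCE A (Python) =====
-- def solution(s):
--     answer = 0
--     start_idx=0
--     end_idx= 0
--     for idx, start in enumerate(s):
--         if start == 'a' or start == 'z':
--             start_idx = idx
--             for idx_end, end in enumerate(s):
--                 if (end == 'a' and start == 'z' and idx_end > start_idx) or (end == 'z' and start == 'a' and idx_end > start_idx):
--                     if 'a' not in s[start_idx+1: idx_end] and 'z' not in s[start_idx+1: idx_end]:
--                         answer += 1
--                     break
--                 else:
--                     continue
--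
--     return answer
-- ===== SOURCE B (Python) =====
-- def solution(s):
--     answer = 0
--     prev = None
--     for c in s:
--         if c == 'a' or c == 'z':
--             if prev is not None and prev != c:
--                 answer += 1
--             prev = c
--     return answer
-- ===== Notes on version B (the rewrite author's own statement) =====
-- stated objective: faster
-- what changed: Replaced the nested scan (for every a/z position, rescan the whole string for the next opposite char and rescan the gap for a/z) by a single pass that keeps only the previous a/z character and counts each differing consecutive a/z pair.
import Mathlib
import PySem

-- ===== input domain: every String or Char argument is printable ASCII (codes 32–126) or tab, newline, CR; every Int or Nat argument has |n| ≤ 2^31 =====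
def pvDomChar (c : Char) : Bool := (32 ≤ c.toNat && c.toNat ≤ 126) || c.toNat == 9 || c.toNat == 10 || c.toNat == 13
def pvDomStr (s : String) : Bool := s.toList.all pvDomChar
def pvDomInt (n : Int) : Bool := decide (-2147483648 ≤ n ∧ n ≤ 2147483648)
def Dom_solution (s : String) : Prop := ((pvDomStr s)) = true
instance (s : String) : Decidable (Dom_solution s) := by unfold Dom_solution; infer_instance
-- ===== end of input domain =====

-- B replaces A's triply-nested scan by a single pass tracking the previous a/z character (asymptotically faster).

-- ===== PORT A =====
-- inner 'for idx_end, end in enumerate(s)' loop with its break: returns the contribution (0 or 1)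
def solInner (l : List Char) (start : Char) (start_idx : Int) : List (Int × Char) → Int
  | [] => 0
  | (idx_end, e) :: rest =>
    if (e = 'a' ∧ start = 'z' ∧ idx_end > start_idx) ∨ (e = 'z' ∧ start = 'a' ∧ idx_end > start_idx) then
      (if PySem.Chars.isIn ['a'] (PySem.List.slice l (some (start_idx + 1)) (some idx_end)) = false ∧
          PySem.Chars.isIn ['z'] (PySem.List.slice l (some (start_idx + 1)) (some idx_end)) = false
       then 1 else 0)
    else solInner l start start_idx rest

def solution (s : String) : Int :=
  let l := s.toList
  (PySem.List.enumerate l 0).foldl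
    (fun answer p =>
      if p.2 = 'a' ∨ p.2 = 'z' then
        answer + solInner l p.2 p.1 (PySem.List.enumerate l 0)
      else answer) 0

-- ===== PORT B =====
def solution_alt (s : String) : Int :=
  (s.toList.foldl
    (fun st c =>
      if c = 'a' ∨ c = 'z' then
        ((match st.2 with
          | some p => if p ≠ c then st.1 + 1 else st.1
          | none => st.1), some c)
      else st) ((0 : Int), (none : Option Char))).1

-- ===== PRECONDITION & SPEC =====
def Spec_solution (s : String) (out : Int) : Prop := out = solution_alt s
instance (s : String) (out : Int) : Decidable (Spec_solution s out) := by unfold Spec_solution; infer_instance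

-- ===== CLAIM (what is proved, stated in full; the proofs are below) =====
def Claim_equal_solution : Prop := ∀ (s : String), Dom_solution s → Spec_solution s (solution s)

-- ===== LEMMAS AND PROOFS =====

-- abbreviation for "is 'a' or 'z'"
abbrev isAZ (c : Char) : Prop := c = 'a' ∨ c = 'z' 

-- value of A's inner loop on the suffix after the start position, as a function of that suffix
def fa (c : Char) : List Char → Int
  | [] => 0
  | d :: t => if isAZ d then (if d ≠ c then 1 else 0) else fa c t

-- B's count, recursively
def cnt (p : Option Char) : List Char → Int
  | [] => 0
  | c :: t =>
    if isAZ c then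
      (match p with | some q => if q ≠ c then 1 else 0 | none => 0) + cnt (some c) t
    else cnt p t

theorem isIn_singleton_false_iff (c : Char) (u : List Char) :
    PySem.Chars.isIn [c] u = false ↔ c ∉ u := by
  rw [PySem.Chars.isIn_eq_false_iff, List.singleton_infix_iff]

-- inner loop skips all enumerate entries with index ≤ start_idx
theorem solInner_skip (l : List Char) (c : Char) (m : Int) (xs ys : List (Int × Char))
    (h : ∀ p ∈ xs, p.1 ≤ m) :
    solInner l c m (xs ++ ys) = solInner l c m ys := by
  induction xs with
  | nil => rfl
  | cons x xs ih =>
    have hx := h x (by simp)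
    simp only [List.cons_append, solInner]
    rw [if_neg, ih (fun p hp => h p (by simp [hp]))]
    rintro (⟨_, _, hgt⟩ | ⟨_, _, hgt⟩) <;> omega

-- the inner loop on the suffix after position m, when the part of the gap already scanned is a/z-free
theorem solInner_clean (l : List Char) (c : Char) (m : Nat) (hc : isAZ c) :
    ∀ (u : List Char) (k : Nat),
      (l.drop (m+1)).drop k = u →
      ((∀ x ∈ (l.drop (m+1)).take k, ¬ isAZ x) →
        solInner l c (m : Int) (PySem.List.enumerate u ((m : Int) + 1 + (k : Nat))) = fa c u) ∧
      ((∃ x ∈ (l.drop (m+1)).take k, isAZ x) →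
        solInner l c (m : Int) (PySem.List.enumerate u ((m : Int) + 1 + (k : Nat))) = 0) := by
  intro u
  induction u with
  | nil => intro k _; exact ⟨fun _ => rfl, fun _ => rfl⟩
  | cons e u ih =>
    intro k hdrop
    have hk : k < (l.drop (m+1)).length := by
      by_contra hge
      rw [List.drop_eq_nil_of_le (by omega)] at hdrop
      exact List.cons_ne_nil _ _ hdrop.symm
    have he : (l.drop (m+1))[k] = e := by
      have h0 : ((l.drop (m+1)).drop k)[0]'(by rw [hdrop]; simp) = e := by
        simp [hdrop]
      rw [List.getElem_drop] at h0
      simpa using h0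
    have hdrop' : (l.drop (m+1)).drop (k+1) = u := by
      have : ((l.drop (m+1)).drop k).tail = u := by rw [hdrop]; rfl
      simpa [List.tail_drop] using this
    have htake' : (l.drop (m+1)).take (k+1) = (l.drop (m+1)).take k ++ [e] := by
      rw [List.take_add_one]
      simp [List.getElem?_eq_getElem hk, he]
    -- the slice in the inner loop's test is exactly the part of the gap scanned so far
    have hslice : PySem.List.slice l (some ((m : Int) + 1)) (some ((m : Int) + 1 + (k : Nat)))
        = (l.drop (m+1)).take k := by
      rw [PySem.List.slice_toNat l (a := (m : Int)+1) (b := (m : Int)+1+(k : Nat)) (by omega) (by omega)]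
      rw [show ((m : Int)+1).toNat = m+1 by omega, show ((m : Int)+1+(k : Nat)).toNat = m+1+k by omega,
        show m+1+k - (m+1) = k by omega]
    have henum : PySem.List.enumerate (e :: u) ((m : Int) + 1 + (k : Nat))
        = ((m : Int) + 1 + (k : Nat), e) :: PySem.List.enumerate u ((m : Int) + 1 + (k : Nat) + 1) := by
      simp [PySem.List.enumerate_cons]
    have hsucc : (m : Int) + 1 + (k : Nat) + 1 = (m : Int) + 1 + ((k+1 : Nat) : Int) := by push_cast; omega
    by_cases hcond : (e = 'a' ∧ c = 'z') ∨ (e = 'z' ∧ c = 'a')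
    · -- inner loop breaks here
      constructor
      · intro hfree
        rw [henum]
        simp only [solInner]
        rw [if_pos (show (e = 'a' ∧ c = 'z' ∧ ((m : Int)+1+(k : Nat)) > (m : Int)) ∨ (e = 'z' ∧ c = 'a' ∧ ((m : Int)+1+(k : Nat)) > (m : Int)) by
              rcases hcond with ⟨h1, h2⟩ | ⟨h1, h2⟩
              · exact Or.inl ⟨h1, h2, by omega⟩
              · exact Or.inr ⟨h1, h2, by omega⟩)]
        rw [if_pos]
        · have heaz : isAZ e := by rcases hcond with ⟨h1, _⟩ | ⟨h1, _⟩ <;> simp [isAZ, h1]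
          have hene : e ≠ c := by rcases hcond with ⟨h1, h2⟩ | ⟨h1, h2⟩ <;> subst h1 <;> subst h2 <;> decide
          simp [fa, heaz, hene]
        · rw [hslice]
          constructor <;> rw [isIn_singleton_false_iff] <;> intro hmem <;>
            exact hfree _ hmem (by simp [isAZ])
      · intro ⟨x, hx, hxaz⟩
        rw [henum]
        simp only [solInner]
        rw [if_pos (show (e = 'a' ∧ c = 'z' ∧ ((m : Int)+1+(k : Nat)) > (m : Int)) ∨ (e = 'z' ∧ c = 'a' ∧ ((m : Int)+1+(k : Nat)) > (m : Int)) by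
              rcases hcond with ⟨h1, h2⟩ | ⟨h1, h2⟩
              · exact Or.inl ⟨h1, h2, by omega⟩
              · exact Or.inr ⟨h1, h2, by omega⟩)]
        rw [if_neg]
        rw [hslice]
        rcases hxaz with hxa | hxz
        · intro ⟨ha, _⟩; rw [isIn_singleton_false_iff] at ha; exact ha (hxa ▸ hx)
        · intro ⟨_, hz⟩; rw [isIn_singleton_false_iff] at hz; exact hz (hxz ▸ hx)
    · -- inner loop continues
      have hnotcond : ¬ ((e = 'a' ∧ c = 'z' ∧ ((m : Int)+1+(k : Nat)) > (m : Int)) ∨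
          (e = 'z' ∧ c = 'a' ∧ ((m : Int)+1+(k : Nat)) > (m : Int))) := by
        rintro (⟨h1, h2, _⟩ | ⟨h1, h2, _⟩) <;> exact hcond (by tauto)
      constructor
      · intro hfree
        rw [henum]
        simp only [solInner]
        rw [if_neg hnotcond, hsucc]
        by_cases heaz : isAZ e
        · -- e is a/z but equal to c (else hcond would hold): result 0 on both sides
          have hec : e = c := by
            rcases heaz with h1 | h1 <;> rcases hc with h2 | h2 <;>
              first | (exact h1.trans h2.symm) | (exact absurd (by tauto) hcond)
          have hcaz : isAZ c := hec ▸ heaz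
          have hfa : fa c (e :: u) = 0 := by simp [fa, hec, hcaz]
          rw [(ih (k+1) hdrop').2 ⟨e, by simp [htake'], heaz⟩, hfa]
        · have hfree' : ∀ x ∈ (l.drop (m+1)).take (k+1), ¬ isAZ x := by
            rw [htake']
            intro x hx
            rcases List.mem_append.mp hx with h | h
            · exact hfree x h
            · simpa [List.mem_singleton.mp h] using heaz
          rw [(ih (k+1) hdrop').1 hfree']
          simp [fa, heaz]
      · intro hex
        rw [henum]
        simp only [solInner]
        rw [if_neg hnotcond, hsucc]
        exact (ih (k+1) hdrop').2 ⟨hex.choose, by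
          obtain ⟨hx, haz⟩ := hex.choose_spec
          exact ⟨by rw [htake']; exact List.mem_append_left _ hx, haz⟩⟩

-- the full inner loop at an a/z position m equals fa of the suffix after m
theorem solInner_eq_fa (l : List Char) (c : Char) (m : Nat) (hc : isAZ c) (hm : m < l.length) :
    solInner l c (m : Int) (PySem.List.enumerate l 0) = fa c (l.drop (m+1)) := by
  have hsplit : l = l.take (m+1) ++ l.drop (m+1) := (List.take_append_drop _ _).symm
  have hlen : (l.take (m+1)).length = m + 1 := by simp; omega
  calc solInner l c (m : Int) (PySem.List.enumerate l 0)
      = solInner l c (m : Int) (PySem.List.enumerate (l.take (m+1) ++ l.drop (m+1)) 0) := by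
        rw [← hsplit]
    _ = solInner l c (m : Int)
          (PySem.List.enumerate (l.take (m+1)) 0 ++ PySem.List.enumerate (l.drop (m+1)) (0 + (l.take (m+1)).length)) := by
        rw [PySem.List.enumerate_append]
    _ = solInner l c (m : Int) (PySem.List.enumerate (l.drop (m+1)) (0 + (l.take (m+1)).length)) := by
        apply solInner_skip
        intro p hp
        obtain ⟨j, hj, hpj⟩ := (PySem.List.mem_enumerate_iff _ _ _).mp hp
        subst hpj
        simp only at *
        omega
    _ = fa c (l.drop (m+1)) := by
        have h0 : (0 : Int) + (l.take (m+1)).length = (m : Int) + 1 + ((0 : Nat) : Int) := by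
          rw [hlen]; push_cast; omega
        rw [h0]
        exact (solInner_clean l c m hc (l.drop (m+1)) 0 (by simp)).1 (by simp)

-- linking lemma: B's count seeded with an a/z char q = fa q + count seeded with none
theorem cnt_some_eq (t : List Char) : ∀ q : Char, isAZ q → cnt (some q) t = fa q t + cnt none t := by
  induction t with
  | nil => intro q _; simp [cnt, fa]
  | cons c t ih =>
    intro q hq
    by_cases hcaz : isAZ c
    · simp only [cnt, fa, if_pos hcaz]
      by_cases hqc : q = c
      · simp [hqc]
      · simp [hqc, Ne.symm hqc]
    · simp only [cnt, fa, if_neg hcaz]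
      exact ih q hq

-- A's outer sum over the suffix with absolute positions, related to cnt
theorem outer_sum_eq (l : List Char) :
    ∀ (t : List Char) (n : Nat), l.drop n = t →
      (PySem.List.enumerate t (n : Int)).foldl
        (fun answer p => if p.2 = 'a' ∨ p.2 = 'z' then answer + solInner l p.2 p.1 (PySem.List.enumerate l 0) else answer) 0
      = cnt none t := by
  intro t
  induction t with
  | nil => intro n _; rfl
  | cons c t ih =>
    intro n hdrop
    have hn : n < l.length := by
      by_contra hge
      rw [List.drop_eq_nil_of_le (by omega)] at hdrop
      exact List.cons_ne_nil _ _ hdrop.symm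
    have hdrop' : l.drop (n+1) = t := by
      have : (l.drop n).tail = t := by rw [hdrop]; rfl
      simpa [List.tail_drop] using this
    have hstep : ∀ (a : Int) (xs : List (Int × Char)) (f : Int → (Int × Char) → Int)
        (hf : ∀ b p, f b p = b + f 0 p),
        xs.foldl f a = a + xs.foldl f 0 := by
      intro a xs f hf
      induction xs generalizing a with
      | nil => simp
      | cons x xs ihx => simp only [List.foldl_cons]; rw [ihx, hf a x, ihx (f 0 x)]; omega
    simp only [PySem.List.enumerate_cons, List.foldl_cons]
    have hcast : ((n : Int) + 1) = ((n+1 : Nat) : Int) := by push_cast; omega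
    by_cases hcaz : c = 'a' ∨ c = 'z'
    · rw [if_pos hcaz]
      have hinner : solInner l c (n : Int) (PySem.List.enumerate l 0) = fa c t := by
        rw [solInner_eq_fa l c n hcaz hn, hdrop']
      rw [hstep, hcast, ih (n+1) hdrop']
      · simp only [cnt, isAZ, if_pos hcaz, hinner]
        rw [cnt_some_eq t c hcaz]
        omega
      · intro b p
        by_cases h : p.2 = 'a' ∨ p.2 = 'z' <;> simp [h]
    · rw [if_neg hcaz]
      rw [hcast, ih (n+1) hdrop']
      simp [cnt, isAZ, hcaz]

-- B's fold computes cnt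
theorem alt_eq_cnt (l : List Char) : ∀ (a : Int) (p : Option Char),
    (l.foldl (fun st c =>
      if c = 'a' ∨ c = 'z' then
        ((match st.2 with
          | some q => if q ≠ c then st.1 + 1 else st.1
          | none => st.1), some c)
      else st) (a, p)).1 = a + cnt p l := by
  induction l with
  | nil => intro a p; simp [cnt]
  | cons c t ih =>
    intro a p
    simp only [List.foldl_cons]
    by_cases hcaz : c = 'a' ∨ c = 'z'
    · rw [if_pos hcaz]
      cases p with
      | none =>
        rw [show (match (none : Option Char) with
            | some q => if q ≠ c then a + 1 else a
            | none => a) = a from rfl]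
        rw [ih]
        simp [cnt, isAZ, hcaz]
      | some q =>
        rw [show (match some q with
            | some q => if q ≠ c then a + 1 else a
            | none => a) = (if q ≠ c then a + 1 else a) from rfl]
        by_cases hqc : q ≠ c
        · rw [if_pos hqc, ih]
          simp only [cnt, isAZ, hcaz, if_true, if_pos hqc]
          omega
        · rw [if_neg hqc, ih]
          simp only [cnt, isAZ, hcaz, if_true, if_neg hqc]
          omega
    · rw [if_neg hcaz]
      rw [ih]
      simp [cnt, isAZ, hcaz]

-- ===== VERDICT (by name: the statement is the Claim_ definition above) =====
theorem solution_spec : Claim_equal_solution := by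
  intro s _
  unfold Spec_solution solution solution_alt
  rw [alt_eq_cnt]
  have := outer_sum_eq s.toList s.toList 0 (by simp)
  simpa using this
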